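-- pv_equiv track=rewrite | github.com/Web3-Platforms/Aegis-Protocol | .github/scripts/sync_project_management_xlsx.py | parse_optional_table_after_heading_prefix
-- ===== SOURCE A (Python) =====
-- def split_table_row(line: str) -> list[str]:
--     return [cell.strip() for cell in line.strip().strip("|").split("|")]
--
-- def find_heading_prefix(lines: list[str], prefix: str) -> int | None:
--     for idx, line in enumerate(lines):
--         if line.strip().startswith(prefix):
--             return idx
--     return None
--
-- def parse_table(lines: list[str], start_idx: int) -> tuple[list[str], list[list[str]], int]:
--     headers = split_table_row(lines[start_idx])
--     idx = start_idx + 2  # skip separator line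
--     rows: list[list[str]] = []
--
--     while idx < len(lines) and lines[idx].lstrip().startswith("|"):
--         row = split_table_row(lines[idx])
--         if any(cell for cell in row):
--             rows.append(row)
--         idx += 1
--
--     return headers, rows, idx
--
-- def parse_optional_table_after_heading_prefix(
--     lines: list[str], prefix: str
-- ) -> tuple[list[str] | None, list[list[str]]]:
--     idx = find_heading_prefix(lines, prefix)
--     if idx is None:
--         return None, []
--
--     idx += 1
--     while idx < len(lines) and not lines[idx].lstrip().startswith("|"):
--         idx += 1
--
--     if idx >= len(lines):
--         return None, []
--
--     headers, rows, _ = parse_table(lines, idx)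
--     return headers, rows
-- ===== SOURCE B (Python) =====
-- def split_table_row(line: str) -> list[str]:
--     return [cell.strip() for cell in line.strip().strip("|").split("|")]
--
-- def parse_optional_table_after_heading_prefix(lines, prefix):
--     # Single pass with an explicit phase: 0 = seeking heading, 1 = seeking header
--     # '|'-line, 2 = skipping the one separator line, 3 = reading rows.
--     phase = 0
--     headers = None
--     rows = []
--     for line in lines:
--         if phase == 0:
--             if line.strip().startswith(prefix):
--                 phase = 1
--         elif phase == 1:
--             if line.lstrip().startswith("|"):
--                 headers = split_table_row(line)
--                 phase = 2
--         elif phase == 2: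
--             phase = 3
--         else:
--             if line.lstrip().startswith("|"):
--                 row = split_table_row(line)
--                 if any(row):
--                     rows.append(row)
--             else:
--                 break
--     if headers is None:
--         return None, []
--     return headers, rows
-- ===== Notes on version B (the rewrite author's own statement) =====
-- stated objective: alternative
-- what changed: Replaces the three separate index-based scans (find heading, skip to first '|' line, parse_table's while loop) with one single pass over the lines driven by an explicit phase variable, keeping headers and rows inline and breaking on the first non-'|' line after the header.
import Mathlib
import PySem

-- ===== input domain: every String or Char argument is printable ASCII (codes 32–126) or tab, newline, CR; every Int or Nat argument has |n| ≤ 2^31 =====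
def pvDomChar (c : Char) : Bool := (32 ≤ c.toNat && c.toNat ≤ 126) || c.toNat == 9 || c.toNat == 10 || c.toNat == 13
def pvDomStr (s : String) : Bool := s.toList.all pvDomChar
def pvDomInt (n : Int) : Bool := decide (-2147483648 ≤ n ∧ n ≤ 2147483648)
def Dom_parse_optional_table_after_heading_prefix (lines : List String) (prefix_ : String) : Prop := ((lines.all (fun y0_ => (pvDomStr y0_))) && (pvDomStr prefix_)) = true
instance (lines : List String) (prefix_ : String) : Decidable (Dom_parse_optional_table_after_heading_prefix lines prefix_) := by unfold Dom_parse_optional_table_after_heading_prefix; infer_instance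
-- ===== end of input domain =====

-- B is an alternative decomposition: one single pass with an explicit phase variable
-- instead of A's three separate index-based scans; same cost, return value proved equal.

-- ===== PORT A =====

-- [cell.strip() for cell in line.strip().strip("|").split("|")]
def split_table_row (line : String) : List String :=
  (-- split on the nonempty literal "|", so split? is always some
  ((PySem.Str.split? (PySem.Str.stripChars (PySem.Str.strip line) "|") "|").getD []).map
    (fun cell => PySem.Str.strip cell))

-- for idx, line in enumerate(lines): if line.strip().startswith(prefix): return idx
def find_heading_prefix : List String → String → Nat → Option Nat
  | [], _, _ => none
  | l :: ls, p, i =>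
      if PySem.Str.startswith (PySem.Str.strip l) p then some i
      else find_heading_prefix ls p (i + 1)

-- while idx < len(lines) and not lines[idx].lstrip().startswith("|"): idx += 1
-- (the call site guarantees every read is in range, so lines[idx] is ported as getD "")
def skipToPipe (lines : List String) (idx : Nat) : Nat :=
  if _h : idx < lines.length then
    if ¬ (PySem.Str.startswith (PySem.Str.lstrip ((lines[idx]?).getD "")) "|") then
      skipToPipe lines (idx + 1)
    else idx
  else idx
termination_by lines.length - idx

-- while idx < len(lines) and lines[idx].lstrip().startswith("|"): …
def rowsLoop (lines : List String) (idx : Nat) (rows : List (List String)) :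
    List (List String) × Nat :=
  if _h : idx < lines.length ∧
      PySem.Str.startswith (PySem.Str.lstrip ((lines[idx]?).getD "")) "|" then
    let row := split_table_row ((lines[idx]?).getD "")
    rowsLoop lines (idx + 1) (if row.any (fun c => c ≠ "") then rows ++ [row] else rows)
  else (rows, idx)
termination_by lines.length - idx

-- parse_table: headers from lines[start_idx], skip separator, collect rows
def parse_table (lines : List String) (start_idx : Nat) :
    List String × List (List String) × Nat :=
  let headers := split_table_row ((lines[start_idx]?).getD "")
  let (rows, idx) := rowsLoop lines (start_idx + 2) []
  (headers, rows, idx)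

def parse_optional_table_after_heading_prefix (lines : List String) (prefix_ : String) :
    Option (List String) × List (List String) :=
  match find_heading_prefix lines prefix_ 0 with
  | none => (none, [])
  | some i =>
      let idx := skipToPipe lines (i + 1)
      if lines.length ≤ idx then (none, [])
      else
        let (headers, rows, _) := parse_table lines idx
        (some headers, rows)

-- ===== PORT B =====

-- single pass; phase 0 = seek heading, 1 = seek header '|' line, 2 = skip separator, 3 = rows
def altLoop : List String → String → Nat → Option (List String) → List (List String) →
    Option (List String) × List (List String)
  | [], _, _, headers, rows =>
      match headers with
      | none => (none, [])
      | some h => (some h, rows)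
  | l :: ls, p, phase, headers, rows =>
      match phase with
      | 0 =>
        if PySem.Str.startswith (PySem.Str.strip l) p then altLoop ls p 1 headers rows
        else altLoop ls p 0 headers rows
      | 1 =>
        if PySem.Str.startswith (PySem.Str.lstrip l) "|" then
          altLoop ls p 2 (some (split_table_row l)) rows
        else altLoop ls p 1 headers rows
      | 2 =>
        altLoop ls p 3 headers rows
      | _ =>
        if PySem.Str.startswith (PySem.Str.lstrip l) "|" then
          let row := split_table_row l
          altLoop ls p 3 headers (if row.any (fun c => c ≠ "") then rows ++ [row] else rows)
        else -- break
          match headers with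
          | none => (none, [])
          | some h => (some h, rows)

def parse_optional_table_after_heading_prefix_alt (lines : List String) (prefix_ : String) :
    Option (List String) × List (List String) :=
  altLoop lines prefix_ 0 none []

-- ===== PRECONDITION & SPEC =====
def Spec_parse_optional_table_after_heading_prefix (lines : List String) (prefix_ : String) (out : Option (List String) × List (List String)) : Prop := out = parse_optional_table_after_heading_prefix_alt lines prefix_
instance (lines : List String) (prefix_ : String) (out : Option (List String) × List (List String)) : Decidable (Spec_parse_optional_table_after_heading_prefix lines prefix_ out) := by unfold Spec_parse_optional_table_after_heading_prefix; infer_instance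

-- ===== CLAIM (what is proved, stated in full; the proofs are below) =====
def Claim_equal_parse_optional_table_after_heading_prefix : Prop := ∀ (lines : List String) (prefix_ : String), Dom_parse_optional_table_after_heading_prefix lines prefix_ → Spec_parse_optional_table_after_heading_prefix lines prefix_ (parse_optional_table_after_heading_prefix lines prefix_)

-- ===== LEMMAS AND PROOFS =====

-- shift lemmas: A's index loops on (l :: ls) at index i+1 are the loops on ls at index i
theorem skipToPipe_shift (l : String) (ls : List String) (i : Nat) :
    skipToPipe (l :: ls) (i + 1) = skipToPipe ls i + 1 := by
  fun_induction skipToPipe ls i with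
  | case1 i h hpipe ih =>
      have e1 : skipToPipe (l :: ls) (i + 1) = skipToPipe (l :: ls) (i + 1 + 1) := by
        rw [skipToPipe, dif_pos (by simp only [List.length_cons]; omega)]
        simp only [List.getElem?_cons_succ]
        rw [if_pos hpipe]
      rw [e1]
      exact ih
  | case2 i h hpipe =>
      have e1 : skipToPipe (l :: ls) (i + 1) = i + 1 := by
        rw [skipToPipe, dif_pos (by simp only [List.length_cons]; omega)]
        simp only [List.getElem?_cons_succ]
        rw [if_neg hpipe]
      rw [e1]
  | case3 i h =>
      have e1 : skipToPipe (l :: ls) (i + 1) = i + 1 := by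
        rw [skipToPipe, dif_neg (by simp only [List.length_cons]; omega)]
      rw [e1]

theorem rowsLoop_shift (l : String) (ls : List String) (i : Nat) (rows : List (List String)) :
    rowsLoop (l :: ls) (i + 1) rows = ((rowsLoop ls i rows).1, (rowsLoop ls i rows).2 + 1) := by
  fun_induction rowsLoop ls i rows with
  | case1 i rows h row ih =>
      have e1 : rowsLoop (l :: ls) (i + 1) rows =
          rowsLoop (l :: ls) (i + 1 + 1)
            (if row.any (fun c => c ≠ "") then rows ++ [row] else rows) := by
        rw [rowsLoop, dif_pos (by
          simp only [List.length_cons, List.getElem?_cons_succ]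
          exact ⟨by omega, h.2⟩)]
        simp only [List.getElem?_cons_succ]
        rfl
      rw [e1]
      exact ih
  | case2 i rows h =>
      have e1 : rowsLoop (l :: ls) (i + 1) rows = (rows, i + 1) := by
        rw [rowsLoop, dif_neg (by
          simp only [List.length_cons, List.getElem?_cons_succ]
          intro hc
          exact h ⟨by omega, hc.2⟩)]
      rw [e1]

-- the tail of A's pipeline, starting at index idx (after 'idx += 1')
def aAfter (lines : List String) (idx : Nat) : Option (List String) × List (List String) :=
  if lines.length ≤ skipToPipe lines idx then (none, [])
  else (some (split_table_row (lines[skipToPipe lines idx]?.getD "")),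
        (rowsLoop lines (skipToPipe lines idx + 2) []).1)

theorem aAfter_shift (l : String) (ls : List String) (i : Nat) :
    aAfter (l :: ls) (i + 1) = aAfter ls i := by
  unfold aAfter
  rw [skipToPipe_shift]
  by_cases h : ls.length ≤ skipToPipe ls i
  · rw [if_pos (by simp only [List.length_cons]; omega), if_pos h]
  · rw [if_neg (by simp only [List.length_cons]; omega), if_neg h]
    rw [show skipToPipe ls i + 1 + 2 = (skipToPipe ls i + 2) + 1 from by omega, rowsLoop_shift]
    simp only [List.getElem?_cons_succ]

-- B's phase-3 loop computes A's rowsLoop rows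
theorem phase3_eq_rowsLoop (ls : List String) (p : String) (h : List String)
    (rows : List (List String)) :
    altLoop ls p 3 (some h) rows = (some h, (rowsLoop ls 0 rows).1) := by
  induction ls generalizing rows with
  | nil => rw [rowsLoop]; simp [altLoop]
  | cons l ls ih =>
      simp only [altLoop]
      by_cases hp : PySem.Str.startswith (PySem.Str.lstrip l) "|"
      · rw [if_pos hp]
        rw [rowsLoop, dif_pos (by
          simp only [List.length_cons, List.getElem?_cons_zero, Option.getD_some]
          exact ⟨Nat.succ_pos _, hp⟩)]
        simp only [List.getElem?_cons_zero, Option.getD_some]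
        rw [show (0 : Nat) + 1 = 0 + 1 from rfl, rowsLoop_shift]
        exact ih _
      · rw [if_neg hp]
        rw [rowsLoop, dif_neg (by
          simp only [List.length_cons, List.getElem?_cons_zero, Option.getD_some]
          intro hc
          exact hp hc.2)]

-- B's phases 1–3 on the suffix after the heading line compute A's tail pipeline
theorem phase1_eq_aAfter (ls : List String) (p : String) :
    altLoop ls p 1 none [] = aAfter ls 0 := by
  induction ls with
  | nil => simp [altLoop, aAfter, skipToPipe]
  | cons l rest ih =>
      simp only [altLoop]
      by_cases hp : PySem.Str.startswith (PySem.Str.lstrip l) "|"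
      · -- header line found here
        rw [if_pos hp]
        have hs : skipToPipe (l :: rest) 0 = 0 := by
          rw [skipToPipe, dif_pos (by simp)]
          simp only [List.getElem?_cons_zero, Option.getD_some]
          rw [if_neg (not_not_intro hp)]
        unfold aAfter
        rw [hs, if_neg (by simp only [List.length_cons]; omega)]
        simp only [List.getElem?_cons_zero, Option.getD_some]
        cases rest with
        | nil =>
            rw [rowsLoop, dif_neg (by simp)]
            simp [altLoop]
        | cons r rest' =>
            simp only [altLoop]
            rw [phase3_eq_rowsLoop]
            rw [show (0 : Nat) + 2 = (0 + 1) + 1 from by omega, rowsLoop_shift,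
              rowsLoop_shift]
      · -- not a '|' line: both sides skip it
        rw [if_neg hp, ih]
        have hs : skipToPipe (l :: rest) 0 = skipToPipe (l :: rest) 1 := by
          rw [skipToPipe, dif_pos (by simp)]
          simp only [List.getElem?_cons_zero, Option.getD_some]
          rw [if_pos hp]
        have h01 : aAfter (l :: rest) 0 = aAfter (l :: rest) 1 := by
          unfold aAfter
          rw [hs]
        rw [h01, show (1 : Nat) = 0 + 1 from rfl, aAfter_shift]

-- find_heading_prefix's accumulator only shifts the result
theorem find_heading_shift (ls : List String) (p : String) (i : Nat) :
    find_heading_prefix ls p (i + 1) = (find_heading_prefix ls p i).map (· + 1) := by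
  induction ls generalizing i with
  | nil => simp [find_heading_prefix]
  | cons l ls ih =>
      rw [find_heading_prefix, find_heading_prefix]
      split_ifs with h
      · simp
      · exact ih (i + 1)

theorem altLoop_seek_pos (l : String) (ls : List String) (p : String)
    (h : PySem.Str.startswith (PySem.Str.strip l) p) :
    altLoop (l :: ls) p 0 none [] = altLoop ls p 1 none [] := by
  simp only [altLoop]
  rw [if_pos h]

theorem altLoop_seek_neg (l : String) (ls : List String) (p : String)
    (h : ¬ PySem.Str.startswith (PySem.Str.strip l) p) :
    altLoop (l :: ls) p 0 none [] = altLoop ls p 0 none [] := by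
  simp only [altLoop]
  rw [if_neg h]

theorem main_eq (lines : List String) (p : String) :
    parse_optional_table_after_heading_prefix lines p =
      parse_optional_table_after_heading_prefix_alt lines p := by
  unfold parse_optional_table_after_heading_prefix parse_optional_table_after_heading_prefix_alt
  induction lines with
  | nil => rfl
  | cons l ls ih =>
      by_cases h : PySem.Str.startswith (PySem.Str.strip l) p
      · rw [find_heading_prefix, if_pos h, altLoop_seek_pos l ls p h, phase1_eq_aAfter]
        exact aAfter_shift l ls 0
      · rw [find_heading_prefix, if_neg h, altLoop_seek_neg l ls p h, ← ih,
          show (0 : Nat) + 1 = 0 + 1 from rfl, find_heading_shift]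
        cases hf : find_heading_prefix ls p 0 with
        | none => rfl
        | some i =>
            rw [Option.map_some]
            exact aAfter_shift l ls (i + 1)

-- ===== VERDICT (by name: the statement is the Claim_ definition above) =====
theorem parse_optional_table_after_heading_prefix_spec : Claim_equal_parse_optional_table_after_heading_prefix := by
  intro lines prefix_ _
  unfold Spec_parse_optional_table_after_heading_prefix
  exact main_eq lines prefix_
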